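-- pv_equiv track=rewrite | github.com/SecMeant/repsms | ProjectSMS/SMS/smsMain/dbfuncs.py | sqlDict_sort
-- ===== SOURCE A (Python) =====
-- def sqlDict_toSortableTable(instance_sqlDict,entries):
-- 	stab = []
-- 	xtab = []
-- 	i = 0
-- 	while(i<entries):
-- 		for each in instance_sqlDict:
-- 			try:
-- 				stab.append(instance_sqlDict[each][i])
-- 			except:
-- 				stab.append(None)
-- 		xtab.append(stab)
-- 		stab = []
-- 		i = i+1
--
-- 	return xtab
--
-- def sqlDict_sort(instance_sqlDict,entries,itemget):
-- 	tab = sqlDict_toSortableTable(instance_sqlDict, entries)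
-- 	tab = sorted(tab,key=lambda l:l[itemget],reverse=True) # Sortowane po punktach
-- 	i = 0
-- 	j = 0
--
-- 	for each in instance_sqlDict:
-- 		instance_sqlDict[each] = []
--
--
-- 	while(i < entries):
-- 		for each in instance_sqlDict:
-- 			instance_sqlDict[each].append(tab[i][j])
-- 			j+=1
-- 		j=0
-- 		i+=1
--
-- 	return instance_sqlDict
-- ===== SOURCE B (Python) =====
-- def sqlDict_sort(instance_sqlDict, entries, itemget):
--     keys = list(instance_sqlDict)
--     order = []
--     if entries > 0:
--         skv = instance_sqlDict[keys[itemget]]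
--         order = sorted(range(entries), key=lambda i: skv[i], reverse=True)
--     for k in keys:
--         old = instance_sqlDict[k]
--         instance_sqlDict[k] = [old[idx] for idx in order]
--     return instance_sqlDict
-- ===== Notes on version B (the rewrite author's own statement) =====
-- stated objective: alternative
-- what changed: B never builds or sorts the transposed table: it sorts a permutation of row indices by the single column the sort key reads (stable, reverse), then gathers each value list through that permutation in one pass per key.
-- outside the precondition, e.g. on sqlDict_sort({'a': [1], 'b': []}, 1, 0): A returns {'a': [1], 'b': [None]}, B raises IndexError
import Mathlib
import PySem

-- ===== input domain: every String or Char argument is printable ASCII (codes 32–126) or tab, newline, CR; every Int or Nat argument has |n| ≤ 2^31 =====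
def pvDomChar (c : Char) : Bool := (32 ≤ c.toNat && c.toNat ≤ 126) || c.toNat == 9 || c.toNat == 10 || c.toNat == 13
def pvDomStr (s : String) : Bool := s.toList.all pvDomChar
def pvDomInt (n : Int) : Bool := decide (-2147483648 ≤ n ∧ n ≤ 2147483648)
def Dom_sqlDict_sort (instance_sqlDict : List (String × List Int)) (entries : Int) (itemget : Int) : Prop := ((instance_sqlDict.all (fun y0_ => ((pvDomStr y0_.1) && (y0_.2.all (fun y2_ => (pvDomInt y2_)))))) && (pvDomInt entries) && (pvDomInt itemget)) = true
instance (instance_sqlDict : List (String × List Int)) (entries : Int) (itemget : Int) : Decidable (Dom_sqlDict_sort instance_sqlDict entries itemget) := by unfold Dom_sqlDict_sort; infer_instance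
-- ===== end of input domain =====

-- B sorts a permutation of row indices by the one column the key looks at, then gathers each value
-- through it, instead of materialising and sorting the whole transposed table (objective: alternative).
-- Both A and B mutate the caller's dict in place in Python; the equivalence proved here is about the
-- returned dict (as its item list).

-- ===== PORT A =====
-- while i < entries: for each key, try append value[i] except append None  →  Option Int cells
def sqlDict_toSortableTable (d : PySem.Dict String (List Int)) (entries : Int) : List (List (Option Int)) :=
  (PySem.List.pyRange 0 entries 1).map (fun i =>
    d.keys.map (fun k => PySem.List.pyGet? (d.getD k []) i))

def sqlDict_sort (instance_sqlDict : List (String × List Int)) (entries : Int) (itemget : Int) : List (String × List Int) :=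
  let d := PySem.Dict.ofList instance_sqlDict
  let tab := sqlDict_toSortableTable d entries
  -- sorted(tab, key=lambda l: l[itemget], reverse=True); where Python's l[itemget] raises or the cell
  -- is a None that gets compared Python raises — such inputs are outside Pre_; none/0 are placeholders
  let tab2 := PySem.List.sorted tab (fun r => ((PySem.List.pyGet? r itemget).getD none).getD 0) true
  -- for each: instance_sqlDict[each] = []
  let d1 := d.keys.foldl (fun acc k => acc.insert k ([] : List Int)) d
  -- while i < entries: for (j, each) in enumerate(dict): append tab[i][j]
  -- (a None cell written back is not an Int — outside Pre_; 0 is a placeholder)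
  let d2 := (PySem.List.pyRange 0 entries 1).foldl (fun acc i =>
    (PySem.List.enumerate acc.keys 0).foldl (fun acc2 jk =>
      acc2.modify jk.2 []
        (fun v => v ++ [((PySem.List.pyGet? ((PySem.List.pyGet? tab2 i).getD []) jk.1).getD none).getD 0])) acc) d1
  d2.items

-- ===== PORT B =====
def sqlDict_sort_alt (instance_sqlDict : List (String × List Int)) (entries : Int) (itemget : Int) : List (String × List Int) :=
  let d := PySem.Dict.ofList instance_sqlDict
  let keys := d.keys
  let order : List Int :=
    if 0 < entries then
      -- skv = instance_sqlDict[keys[itemget]]  (keys[itemget] raising IndexError is outside Pre_)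
      let skv := d.getD ((PySem.List.pyGet? keys itemget).getD "") []
      -- sorted(range(entries), key=lambda i: skv[i], reverse=True)  (skv[i] raising is outside Pre_)
      PySem.List.sorted (PySem.List.pyRange 0 entries 1) (fun i => (PySem.List.pyGet? skv i).getD 0) true
    else []
  (keys.foldl (fun acc k =>
      let old := acc.getD k []
      acc.insert k (order.map (fun idx => (PySem.List.pyGet? old idx).getD 0))) d).items

-- ===== PRECONDITION & SPEC =====
-- Pre_ excludes, for 0 < entries, (a) itemget outside the key-row range, where Python A raises
-- IndexError (or TypeError comparing a None cell), and (b) entries exceeding some value's length,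
-- where A writes None into the value lists — not a value of the declared List Int type.
def Pre_sqlDict_sort (instance_sqlDict : List (String × List Int)) (entries : Int) (itemget : Int) : Prop :=
  0 < entries →
    ((∀ p ∈ (PySem.Dict.ofList instance_sqlDict).items, entries ≤ (p.2.length : Int)) ∧
     PySem.Raise.InRange (PySem.Dict.ofList instance_sqlDict).keys.length itemget)
instance (instance_sqlDict : List (String × List Int)) (entries : Int) (itemget : Int) : Decidable (Pre_sqlDict_sort instance_sqlDict entries itemget) := by unfold Pre_sqlDict_sort; infer_instance
def pvWitness_sqlDict_sort : (List (String × List Int)) × Int × Int := ([("a", [1, 3]), ("b", [2, 4])], 2, 0)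

def Spec_sqlDict_sort (instance_sqlDict : List (String × List Int)) (entries : Int) (itemget : Int) (out : List (String × List Int)) : Prop := out = sqlDict_sort_alt instance_sqlDict entries itemget
instance (instance_sqlDict : List (String × List Int)) (entries : Int) (itemget : Int) (out : List (String × List Int)) : Decidable (Spec_sqlDict_sort instance_sqlDict entries itemget out) := by unfold Spec_sqlDict_sort; infer_instance

-- ===== CLAIM (what is proved, stated in full; the proofs are below) =====
def Claim_equal_sqlDict_sort : Prop := ∀ (instance_sqlDict : List (String × List Int)) (entries : Int) (itemget : Int), Dom_sqlDict_sort instance_sqlDict entries itemget → Pre_sqlDict_sort instance_sqlDict entries itemget → Spec_sqlDict_sort instance_sqlDict entries itemget (sqlDict_sort instance_sqlDict entries itemget)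

-- ===== LEMMAS AND PROOFS =====

-- xs[i] of a mapped list
theorem pvGet_map {α β : Type} (l : List α) (f : α → β) (i : Int) :
    PySem.List.pyGet? (l.map f) i = (PySem.List.pyGet? l i).map f := by
  simp [PySem.List.pyGet?]

theorem pvRange_nonpos (e : Int) (h : e ≤ 0) : PySem.List.pyRange 0 e 1 = [] := by
  simp [PySem.List.pyRange]; omega

theorem pvInsertBy_map {α β : Type} (g : α → β) (p : β → β → Bool) (x : α) (ys : List α) :
    PySem.List.insertBy p (g x) (ys.map g) =
      (PySem.List.insertBy (fun a b => p (g a) (g b)) x ys).map g := by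
  induction ys with
  | nil => simp [PySem.List.insertBy]
  | cons y ys ih =>
    simp only [List.map_cons, PySem.List.insertBy]
    by_cases h : p (g x) (g y) = true <;> simp [h, ih]

-- sorting a mapped list = mapping the index list sorted by the composed key (insertion sort is structural)
theorem pvSorted_rev_map {α β : Type} (l : List α) (g : α → β) (key : β → Int) :
    PySem.List.sorted (l.map g) key true =
      (PySem.List.sorted l (fun a => key (g a)) true).map g := by
  rw [PySem.List.sorted_rev_eq_foldl_insertBy, PySem.List.sorted_rev_eq_foldl_insertBy,
    List.foldl_map]
  suffices h : ∀ acc : List α,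
      List.foldl (fun acc x => PySem.List.insertBy (fun a b => decide (key b < key a)) (g x) acc)
        (acc.map g) l =
      (List.foldl (fun acc x =>
        PySem.List.insertBy (fun a b => decide (key (g b) < key (g a))) x acc) acc l).map g by
    simpa using h []
  induction l with
  | nil => simp
  | cons x xs ih =>
    intro acc
    rw [List.foldl_cons, List.foldl_cons, pvInsertBy_map, ih]

theorem pvSetUpdate_self {α : Type} [BEq α] [LawfulBEq α] (l : List α) (s : PySem.Set α)
    (h : ∀ x ∈ l, x ∈ s) : PySem.Set.update s l = s := by
  induction l generalizing s with
  | nil => rfl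
  | cons x xs ih =>
    have hx : PySem.Set.contains s x = true := by
      simp [PySem.Set.contains]
      exact h x (by simp)
    simp only [PySem.Set.update, List.foldl_cons, PySem.Set.add, hx, if_pos]
    exact ih s (fun y hy => h y (by simp [hy]))

-- getD through a fold of inserts (B's rebuild loop and A's clearing loop)
theorem pvFoldlInsert_getD_not_mem {ν : Type} (ks : List String)
    (G : String → ν → ν) (d0 : ν) (acc : PySem.Dict String ν) (k : String) (hk : k ∉ ks) :
    (ks.foldl (fun a k' => a.insert k' (G k' (a.getD k' d0))) acc).getD k d0 = acc.getD k d0 := by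
  induction ks generalizing acc with
  | nil => rfl
  | cons x xs ih =>
    simp only [List.mem_cons, not_or] at hk
    simp only [List.foldl_cons, ih _ hk.2, PySem.Dict.getD_insert_of_ne _ _ _ hk.1]

theorem pvFoldlInsert_getD_mem {ν : Type} (ks : List String) (hnd : ks.Nodup)
    (G : String → ν → ν) (d0 : ν) (acc : PySem.Dict String ν) (k : String) (hk : k ∈ ks) :
    (ks.foldl (fun a k' => a.insert k' (G k' (a.getD k' d0))) acc).getD k d0 =
      G k (acc.getD k d0) := by
  induction ks generalizing acc with
  | nil => simp at hk
  | cons x xs ih =>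
    simp only [List.nodup_cons] at hnd
    rcases List.mem_cons.mp hk with h | h
    · subst h
      simp only [List.foldl_cons, pvFoldlInsert_getD_not_mem xs G d0 _ k hnd.1,
        PySem.Dict.getD_insert_self _ _ _ _]
    · have hne : k ≠ x := fun he => hnd.1 (he ▸ h)
      simp only [List.foldl_cons, ih hnd.2 _ h, PySem.Dict.getD_insert_of_ne _ _ _ hne]

-- the filter produced by A's inner enumerate loop, seen through getD_foldl_modify_append
theorem pvEnumFilter_not_mem (ks : List String) (cf : Int → Int) (s : Int) (c : String)
    (hc : c ∉ ks) :
    ((PySem.List.enumerate ks s).map (fun jk => (jk.2, cf jk.1))).filter (fun p => p.1 == c) = [] := by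
  induction ks generalizing s with
  | nil => simp [PySem.List.enumerate_nil]
  | cons x xs ih =>
    simp only [List.mem_cons, not_or] at hc
    have hne : (x == c) = false := by
      simp only [beq_eq_false_iff_ne, ne_eq]
      exact fun he => hc.1 he.symm
    simp [PySem.List.enumerate_cons, hne, ih _ hc.2]

theorem pvEnumFilter_mem (ks : List String) (hnd : ks.Nodup) (cf : Int → Int) (s : Int)
    (j : Nat) (hj : j < ks.length) :
    ((PySem.List.enumerate ks s).map (fun jk => (jk.2, cf jk.1))).filter
        (fun p => p.1 == ks[j]) = [(ks[j], cf (s + j))] := by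
  induction ks generalizing s j with
  | nil => simp at hj
  | cons x xs ih =>
    simp only [List.nodup_cons] at hnd
    cases j with
    | zero =>
      simp only [List.getElem_cons_zero, PySem.List.enumerate_cons, List.map_cons,
        List.filter_cons, beq_self_eq_true, if_pos, Nat.cast_zero, add_zero]
      simp [pvEnumFilter_not_mem xs cf (s + 1) x hnd.1]
    | succ j' =>
      have hj' : j' < xs.length := by simpa using hj
      have hmem : xs[j'] ∈ xs := List.getElem_mem hj'
      have hne : (x == xs[j']) = false := by
        simp only [beq_eq_false_iff_ne, ne_eq]
        exact fun he => hnd.1 (he ▸ hmem)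
      simp only [List.getElem_cons_succ, PySem.List.enumerate_cons, List.map_cons,
        List.filter_cons, hne]
      have harg : (s + 1) + (j' : Int) = s + ((j' + 1 : Nat) : Int) := by push_cast; ring
      rw [ih hnd.2 (s + 1) j' hj', harg]
      simp

-- A's inner loop, as one append per key
theorem pvInner_getD (ks : List String) (hnd : ks.Nodup) (cf : Int → Int)
    (acc : PySem.Dict String (List Int)) (j : Nat) (hj : j < ks.length) :
    ((PySem.List.enumerate ks 0).foldl
        (fun a jk => a.modify jk.2 [] (fun v => v ++ [cf jk.1])) acc).getD ks[j] [] =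
      acc.getD ks[j] [] ++ [cf j] := by
  have hfold : (PySem.List.enumerate ks 0).foldl
      (fun a jk => a.modify jk.2 [] (fun v => v ++ [cf jk.1])) acc =
      ((PySem.List.enumerate ks 0).map (fun jk => (jk.2, cf jk.1))).foldl
        (fun a p => a.modify p.1 [] (fun v => v ++ [p.2])) acc := by
    rw [List.foldl_map]
  rw [hfold, PySem.Dict.getD_foldl_modify_append, pvEnumFilter_mem ks hnd cf 0 j hj]
  simp

-- keys are unchanged by A's inner loop
theorem pvInner_keys (ks : List String) (cf : Int → Int) (acc : PySem.Dict String (List Int))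
    (h : ∀ k ∈ ks, k ∈ acc.keys) :
    ((PySem.List.enumerate ks 0).foldl
        (fun a jk => a.modify jk.2 [] (fun v => v ++ [cf jk.1])) acc).keys = acc.keys := by
  rw [PySem.Dict.keys_foldl_modify_key (PySem.List.enumerate ks 0) (fun jk => jk.2) []
    (fun _ jk => (fun v => v ++ [cf jk.1])), PySem.List.map_snd_enumerate]
  exact pvSetUpdate_self ks acc.keys h

-- A's outer while-loop: each processed index appends one cell to every key's value
theorem pvOuter_getD (I : List Int) (CF : Int → Int → Int)
    (acc : PySem.Dict String (List Int)) (ks : List String) (hks : acc.keys = ks)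
    (hnd : ks.Nodup) (j : Nat) (hj : j < ks.length) :
    (I.foldl (fun a i =>
        (PySem.List.enumerate a.keys 0).foldl
          (fun a2 jk => a2.modify jk.2 [] (fun v => v ++ [CF i jk.1])) a) acc).getD ks[j] [] =
      acc.getD ks[j] [] ++ I.map (fun i => CF i j) := by
  induction I generalizing acc with
  | nil => simp
  | cons i I ih =>
    have hkeys : ((PySem.List.enumerate acc.keys 0).foldl
        (fun a2 jk => a2.modify jk.2 [] (fun v => v ++ [CF i jk.1])) acc).keys = ks := by
      rw [pvInner_keys _ _ _ (fun k hk => hk)]; exact hks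
    simp only [List.foldl_cons, List.map_cons]
    rw [ih _ hkeys, hks]
    rw [pvInner_getD ks hnd (CF i) acc j hj]
    simp

theorem pvOuter_keys (I : List Int) (CF : Int → Int → Int)
    (acc : PySem.Dict String (List Int)) :
    (I.foldl (fun a i =>
        (PySem.List.enumerate a.keys 0).foldl
          (fun a2 jk => a2.modify jk.2 [] (fun v => v ++ [CF i jk.1])) a) acc).keys = acc.keys := by
  induction I generalizing acc with
  | nil => rfl
  | cons i I ih => rw [List.foldl_cons, ih, pvInner_keys _ _ _ (fun k hk => hk)]

-- keys unchanged by a fold of inserts at existing keys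
theorem pvFoldlInsert_keys {ν : Type} (ks : List String) (f : PySem.Dict String ν → String → ν)
    (d : PySem.Dict String ν) (h : ∀ k ∈ ks, k ∈ d.keys) :
    (ks.foldl (fun a k => a.insert k (f a k)) d).keys = d.keys := by
  rw [PySem.Dict.keys_foldl_insert]
  exact pvSetUpdate_self ks d.keys h

-- abbreviations for the proof (definitionally equal to subterms of the unfolded ports)
def pvRow (d : PySem.Dict String (List Int)) (i : Int) : List (Option Int) :=
  d.keys.map (fun k => PySem.List.pyGet? (d.getD k []) i)

def pvKeyA (ig : Int) (r : List (Option Int)) : Int :=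
  ((PySem.List.pyGet? r ig).getD none).getD 0

def pvCF (tab2 : List (List (Option Int))) (i j : Int) : Int :=
  ((PySem.List.pyGet? ((PySem.List.pyGet? tab2 i).getD []) j).getD none).getD 0

-- the whole positive-entries case, on named subterms
theorem pvMain (d : PySem.Dict String (List Int)) (e ig : Int) (he : 0 < e)
    (hnd : d.keys.Nodup) (hig : PySem.Raise.InRange d.keys.length ig) :
    ((PySem.List.pyRange 0 e 1).foldl (fun acc i =>
        (PySem.List.enumerate acc.keys 0).foldl (fun acc2 jk =>
          acc2.modify jk.2 [] (fun v => v ++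
            [pvCF (PySem.List.sorted ((PySem.List.pyRange 0 e 1).map (pvRow d)) (pvKeyA ig) true)
              i jk.1])) acc)
      (d.keys.foldl (fun acc k => acc.insert k ([] : List Int)) d)).items =
    (d.keys.foldl (fun acc k =>
        acc.insert k ((PySem.List.sorted (PySem.List.pyRange 0 e 1)
            (fun i => (PySem.List.pyGet? (d.getD ((PySem.List.pyGet? d.keys ig).getD "") []) i).getD 0)
            true).map
          (fun idx => (PySem.List.pyGet? (acc.getD k []) idx).getD 0))) d).items := by
  -- ks[itemget] exists
  obtain ⟨v, hv⟩ : ∃ v, PySem.List.pyGet? d.keys ig = some v := by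
    cases h : PySem.List.pyGet? d.keys ig with
    | none => exact absurd hig ((PySem.List.pyGet?_eq_none_iff d.keys ig).mp h)
    | some v => exact ⟨v, rfl⟩
  -- the range, as a map over List.range
  have hR : PySem.List.pyRange 0 e 1 = (List.range e.toNat).map (fun k : Nat => (k : Int)) := by
    conv_lhs => rw [← Int.toNat_of_nonneg he.le]
    exact PySem.List.pyRange_zero_natCast e.toNat
  -- A sorts the mapped rows = B's index sort, gathered through pvRow
  have hsort : PySem.List.sorted ((PySem.List.pyRange 0 e 1).map (pvRow d)) (pvKeyA ig) true =
      (PySem.List.sorted (PySem.List.pyRange 0 e 1)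
        (fun i => (PySem.List.pyGet? (d.getD ((PySem.List.pyGet? d.keys ig).getD "") []) i).getD 0)
        true).map (pvRow d) := by
    have hkey : (fun a : Int => pvKeyA ig (pvRow d a)) =
        (fun i : Int =>
          (PySem.List.pyGet? (d.getD ((PySem.List.pyGet? d.keys ig).getD "") []) i).getD 0) := by
      funext i
      simp [pvKeyA, pvRow, pvGet_map, hv]
    rw [pvSorted_rev_map, hkey]
  rw [hsort]
  set O := PySem.List.sorted (PySem.List.pyRange 0 e 1)
      (fun i => (PySem.List.pyGet? (d.getD ((PySem.List.pyGet? d.keys ig).getD "") []) i).getD 0)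
      true with hO
  have hOlen : O.length = e.toNat := by
    rw [hO, PySem.List.length_sorted, hR, List.length_map, List.length_range]
  -- keys bookkeeping
  have hk1 : (d.keys.foldl (fun acc k => acc.insert k ([] : List Int)) d).keys = d.keys :=
    pvFoldlInsert_keys d.keys (fun _ _ => []) d (fun k hk => hk)
  have hk2 : ((PySem.List.pyRange 0 e 1).foldl (fun acc i =>
        (PySem.List.enumerate acc.keys 0).foldl (fun acc2 jk =>
          acc2.modify jk.2 [] (fun v => v ++ [pvCF (O.map (pvRow d)) i jk.1])) acc)
      (d.keys.foldl (fun acc k => acc.insert k ([] : List Int)) d)).keys = d.keys := by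
    rw [pvOuter_keys (PySem.List.pyRange 0 e 1) (pvCF (O.map (pvRow d))), hk1]
  have hkB : (d.keys.foldl (fun acc k =>
      acc.insert k (O.map (fun idx => (PySem.List.pyGet? (acc.getD k []) idx).getD 0))) d).keys =
      d.keys :=
    pvFoldlInsert_keys d.keys
      (fun acc k => O.map (fun idx => (PySem.List.pyGet? (acc.getD k []) idx).getD 0)) d
      (fun k hk => hk)
  rw [PySem.Dict.items_eq_map_keys _ (by rw [hk2]; exact hnd) [], PySem.Dict.items_eq_map_keys _ (by rw [hkB]; exact hnd) [],
    hk2, hkB]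
  apply List.map_congr_left
  intro k hk
  obtain ⟨j, hj, rfl⟩ := List.mem_iff_getElem.mp hk
  congr 1
  -- A's value at key j
  have hA2 : (d.keys.foldl (fun acc k => acc.insert k ([] : List Int)) d).getD d.keys[j] [] = [] :=
    pvFoldlInsert_getD_mem d.keys hnd (fun _ _ => []) [] d d.keys[j] (List.getElem_mem hj)
  have hA : ((PySem.List.pyRange 0 e 1).foldl (fun acc i =>
        (PySem.List.enumerate acc.keys 0).foldl (fun acc2 jk =>
          acc2.modify jk.2 [] (fun v => v ++ [pvCF (O.map (pvRow d)) i jk.1])) acc)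
      (d.keys.foldl (fun acc k => acc.insert k ([] : List Int)) d)).getD d.keys[j] [] =
      (PySem.List.pyRange 0 e 1).map (fun i => pvCF (O.map (pvRow d)) i j) := by
    rw [pvOuter_getD (PySem.List.pyRange 0 e 1) (pvCF (O.map (pvRow d))) _ d.keys hk1 hnd j hj,
      hA2, List.nil_append]
  -- B's value at key j
  have hB : (d.keys.foldl (fun acc k =>
      acc.insert k (O.map (fun idx => (PySem.List.pyGet? (acc.getD k []) idx).getD 0))) d).getD
        d.keys[j] [] =
      O.map (fun idx => (PySem.List.pyGet? (d.getD d.keys[j] []) idx).getD 0) :=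
    pvFoldlInsert_getD_mem d.keys hnd
      (fun k old => O.map (fun idx => (PySem.List.pyGet? old idx).getD 0)) [] d d.keys[j]
      (List.getElem_mem hj)
  rw [hA, hB, hR, List.map_map]
  apply List.ext_getElem
  · simp [hOlen]
  intro p hp hp2
  have hpm : p < e.toNat := by simpa using hp
  have hpO : p < O.length := by omega
  simp only [List.getElem_map, Function.comp_apply, List.getElem_range]
  show pvCF (O.map (pvRow d)) p j = (PySem.List.pyGet? (d.getD d.keys[j] []) O[p]).getD 0
  have h1 : PySem.List.pyGet? (O.map (pvRow d)) (p : Int) = some (pvRow d O[p]) := by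
    rw [PySem.List.pyGet?_natCast]
    simp [hpO]
  have h2 : PySem.List.pyGet? (pvRow d O[p]) (j : Int) =
      some (PySem.List.pyGet? (d.getD d.keys[j] []) O[p]) := by
    rw [pvRow, pvGet_map, PySem.List.pyGet?_natCast]
    simp [hj]
  simp [pvCF, h1, h2]

-- ===== VERDICT (by name: the statement is the Claim_ definition above) =====
theorem sqlDict_sort_spec : Claim_equal_sqlDict_sort := by
  intro l e ig _dom hpre
  unfold Spec_sqlDict_sort sqlDict_sort sqlDict_sort_alt sqlDict_toSortableTable
  by_cases he : 0 < e
  · obtain ⟨-, hig⟩ := hpre he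
    simp only [if_pos he]
    exact pvMain (PySem.Dict.ofList l) e ig he (PySem.Dict.nodup_keys_ofList l) hig
  · have hR : PySem.List.pyRange 0 e 1 = [] := pvRange_nonpos e (by omega)
    simp only [if_neg he, hR, List.foldl_nil, List.map_nil]
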